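-- pv_equiv track=rewrite | github.com/maelfq/facemask_detection | f_utils.py | get_output_count
-- ===== SOURCE A (Python) =====
-- def get_output_count(preds_list):
--     values_list = [0, 1, 2]
--     values_count = [0, 0, 0]
--     vgg16_flag = False
--
--     for element in preds_list:
--         if element == values_list[0]:
--             values_count[0] += 1
--         elif element == values_list[1]:
--             values_count[1] += 1
--         elif element == values_list[2]:
--             values_count[2] += 1
--     if preds_list[0] == 1:
--         vgg16_flag = True
--     return values_count, vgg16_flag
-- ===== SOURCE B (Python) =====
-- def _lower_bound(s, x):
--     # first index at which x could be inserted into sorted s (leftmost)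
--     lo, hi = 0, len(s)
--     while lo < hi:
--         mid = (lo + hi) // 2
--         if s[mid] < x:
--             lo = mid + 1
--         else:
--             hi = mid
--     return lo
--
--
-- def get_output_count(preds_list):
--     # alternative: sort once, then locate the 0/1/2 value boundaries by binary search
--     vgg16_flag = preds_list[0] == 1
--     s = sorted(preds_list)
--     lo0 = _lower_bound(s, 0)
--     lo1 = _lower_bound(s, 1)
--     lo2 = _lower_bound(s, 2)
--     lo3 = _lower_bound(s, 3)
--     values_count = [lo1 - lo0, lo2 - lo1, lo3 - lo2]
--     return values_count, vgg16_flag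
-- ===== Notes on version B (the rewrite author's own statement) =====
-- stated objective: alternative
-- what changed: Instead of A's single tallying loop over three mutable counters, B sorts the list once and finds the boundaries of the runs of 0, 1 and 2 with a hand-written binary search (lower bound), taking each count as a difference of adjacent boundaries; the head-equals-1 flag is computed up front.
-- outside the precondition, e.g. on get_output_count([]): A raises IndexError, B raises IndexError
import Mathlib
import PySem

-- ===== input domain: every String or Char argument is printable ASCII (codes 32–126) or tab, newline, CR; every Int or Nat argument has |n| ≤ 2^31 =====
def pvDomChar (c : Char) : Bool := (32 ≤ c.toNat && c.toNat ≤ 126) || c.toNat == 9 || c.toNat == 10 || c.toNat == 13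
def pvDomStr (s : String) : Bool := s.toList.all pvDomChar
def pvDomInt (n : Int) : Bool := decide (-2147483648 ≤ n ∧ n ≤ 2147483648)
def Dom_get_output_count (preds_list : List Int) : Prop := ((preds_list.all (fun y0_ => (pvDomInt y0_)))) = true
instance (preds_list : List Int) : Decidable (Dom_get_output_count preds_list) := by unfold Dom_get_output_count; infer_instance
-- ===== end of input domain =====

-- B replaces A's single tallying loop by sort-once + binary-searched value boundaries; objective: alternative (not faster).


-- ===== PORT A =====
def get_output_count (preds_list : List Int) : List Int × Bool :=
  let values_list : List Int := [0, 1, 2]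
  let values_count : Int × Int × Int :=
    preds_list.foldl (fun c element =>
      if element = values_list.getD 0 0 then (c.1 + 1, c.2.1, c.2.2)
      else if element = values_list.getD 1 0 then (c.1, c.2.1 + 1, c.2.2)
      else if element = values_list.getD 2 0 then (c.1, c.2.1, c.2.2 + 1)
      else c) (0, 0, 0)
  let vgg16_flag :=
    match PySem.List.pyGet? preds_list 0 with  -- preds_list[0]; none = IndexError, excluded by Pre_
    | some x => x = 1
    | none => false
  ([values_count.1, values_count.2.1, values_count.2.2], vgg16_flag)

-- ===== PORT B =====
-- _lower_bound(s, x): hand-written binary search from Source B; s[mid] has 0 ≤ mid < hi ≤ len(s), so getD is exact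
def lowerBound (s : List Int) (x : Int) (lo hi : Nat) : Nat :=
  if lo < hi then
    let mid := (lo + hi) / 2
    if s.getD mid 0 < x then lowerBound s x (mid + 1) hi
    else lowerBound s x lo mid
  else lo
termination_by hi - lo
decreasing_by all_goals omega

def get_output_count_alt (preds_list : List Int) : List Int × Bool :=
  let vgg16_flag :=
    match PySem.List.pyGet? preds_list 0 with  -- preds_list[0]; none = IndexError, excluded by Pre_
    | some x => x = 1
    | none => false
  let s := PySem.List.sorted preds_list (fun x => x) false
  let lo0 := lowerBound s 0 0 s.length
  let lo1 := lowerBound s 1 0 s.length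
  let lo2 := lowerBound s 2 0 s.length
  let lo3 := lowerBound s 3 0 s.length
  ([(lo1 : Int) - (lo0 : Int), (lo2 : Int) - (lo1 : Int), (lo3 : Int) - (lo2 : Int)], vgg16_flag)

-- ===== PRECONDITION & SPEC =====
-- A raises IndexError on the empty list (preds_list[0]); B raises there too.
def Pre_get_output_count (preds_list : List Int) : Prop := preds_list ≠ []
instance (preds_list : List Int) : Decidable (Pre_get_output_count preds_list) := by unfold Pre_get_output_count; infer_instance
def pvWitness_get_output_count : List Int := [1, 0, 2, 7]

def Spec_get_output_count (preds_list : List Int) (out : List Int × Bool) : Prop := out = get_output_count_alt preds_list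
instance (preds_list : List Int) (out : List Int × Bool) : Decidable (Spec_get_output_count preds_list out) := by unfold Spec_get_output_count; infer_instance

-- ===== CLAIM (what is proved, stated in full; the proofs are below) =====
def Claim_equal_get_output_count : Prop := ∀ (preds_list : List Int), Dom_get_output_count preds_list → Pre_get_output_count preds_list → Spec_get_output_count preds_list (get_output_count preds_list)

-- ===== LEMMAS AND PROOFS =====

-- A's loop computes the three counts.
theorem gc_fold (l : List Int) (a b c : Int) :
    l.foldl (fun (x : Int × Int × Int) element =>
      if element = 0 then (x.1 + 1, x.2.1, x.2.2)
      else if element = 1 then (x.1, x.2.1 + 1, x.2.2)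
      else if element = 2 then (x.1, x.2.1, x.2.2 + 1)
      else x) (a, b, c)
    = (a + l.count 0, b + l.count 1, c + l.count 2) := by
  induction l generalizing a b c with
  | nil => simp
  | cons h t ih =>
    by_cases h0 : h = 0
    · simp [h0, ih]; omega
    · by_cases h1 : h = 1
      · simp [h1, ih]; omega
      · by_cases h2 : h = 2
        · simp [h2, ih]; omega
        · simp [h0, h1, h2, ih]

-- In a sorted list the elements < x form a prefix of length countP (· < x).
theorem sorted_lt_iff (s : List Int) (x : Int) (hs : s.Pairwise (· ≤ ·)) :
    ∀ i, i < s.length → (s.getD i 0 < x ↔ i < s.countP (fun a => decide (a < x))) := by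
  induction s with
  | nil => intro i hi; simp at hi
  | cons h t ih =>
    intro i hi
    rcases List.pairwise_cons.mp hs with ⟨hhd, htl⟩
    by_cases hx : h < x
    · cases i with
      | zero => simp [List.countP_cons, hx]
      | succ j =>
        have hrec := ih htl j (by simpa using hi)
        rw [List.getD_eq_getElem?_getD] at hrec
        simp [hx, List.getD_eq_getElem?_getD]
        omega
    · have hall : t.countP (fun a => decide (a < x)) = 0 := by
        rw [List.countP_eq_zero]
        intro a ha
        have := hhd a ha
        simp; omega
      cases i with
      | zero => simp [hx, hall]
      | succ j =>
        have hj : j < t.length := by simpa using hi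
        have hmem : t.getD j 0 ∈ t := by
          rw [List.getD_eq_getElem?_getD, List.getElem?_eq_getElem hj]
          exact List.getElem_mem hj
        have hle := hhd _ hmem
        rw [List.getD_eq_getElem?_getD] at hle
        simp [hx, hall, List.getD_eq_getElem?_getD]
        omega

-- The binary search returns exactly that prefix length.
theorem lowerBound_eq (s : List Int) (x : Int) (hs : s.Pairwise (· ≤ ·)) :
    ∀ n lo hi, hi - lo ≤ n → hi ≤ s.length →
      lo ≤ s.countP (fun a => decide (a < x)) → s.countP (fun a => decide (a < x)) ≤ hi →
      lowerBound s x lo hi = s.countP (fun a => decide (a < x)) := by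
  intro n
  induction n with
  | zero =>
    intro lo hi h1 _ h3 h4
    rw [lowerBound]
    have : ¬ lo < hi := by omega
    simp [this]; omega
  | succ m ih =>
    intro lo hi h1 h2 h3 h4
    rw [lowerBound]
    by_cases hlt : lo < hi
    · simp only [hlt, if_true]
      set mid := (lo + hi) / 2 with hmid
      have hmlo : lo ≤ mid := by omega
      have hmhi : mid < hi := by omega
      have hmlen : mid < s.length := by omega
      have hiff := sorted_lt_iff s x hs mid hmlen
      by_cases hc : s.getD mid 0 < x
      · have : mid < s.countP (fun a => decide (a < x)) := hiff.mp hc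
        simp only [hc, if_true]
        exact ih (mid + 1) hi (by omega) h2 (by omega) h4
      · have : ¬ mid < s.countP (fun a => decide (a < x)) := fun h => hc (hiff.mpr h)
        simp only [hc, if_false]
        exact ih lo mid (by omega) (by omega) h3 (by omega)
    · simp [hlt]; omega

-- countP (< v+1) = countP (< v) + count v, over the integers.
theorem countP_lt_succ (l : List Int) (v : Int) :
    l.countP (fun a => decide (a < v + 1)) = l.countP (fun a => decide (a < v)) + l.count v := by
  induction l with
  | nil => simp
  | cons h t ih =>
    rw [List.countP_cons, List.countP_cons, List.count_cons, ih]
    rcases lt_trichotomy h v with hc | hc | hc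
    · have b1 : decide (h < v + 1) = true := decide_eq_true (by omega)
      have b2 : decide (h < v) = true := decide_eq_true hc
      have b3 : (h == v) = false := by simp [hc.ne]
      simp only [b1, b2, b3, if_true, if_false, Bool.false_eq_true]
      omega
    · have b1 : decide (h < v + 1) = true := decide_eq_true (by omega)
      have b2 : decide (h < v) = false := decide_eq_false (by omega)
      have b3 : (h == v) = true := by simp [hc]
      simp only [b1, b2, b3, if_true, if_false, Bool.false_eq_true]
      omega
    · have b1 : decide (h < v + 1) = false := decide_eq_false (by omega)
      have b2 : decide (h < v) = false := decide_eq_false (by omega)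
      have b3 : (h == v) = false := by simp [(ne_of_gt hc)]
      simp only [b1, b2, b3, if_true, if_false, Bool.false_eq_true]
      omega

-- ===== VERDICT (by name: the statement is the Claim_ definition above) =====
theorem get_output_count_spec : Claim_equal_get_output_count := by
  intro l _ _
  unfold Spec_get_output_count get_output_count get_output_count_alt
  have hs : (PySem.List.sorted l (fun x => x) false).Pairwise (· ≤ ·) := by
    simpa using PySem.List.sorted_pairwise l (fun x => x)
  have hperm : (PySem.List.sorted l (fun x => x) false).Perm l :=
    PySem.List.sorted_perm l (fun x => x) false
  set s := PySem.List.sorted l (fun x => x) false with hsdef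
  have hlb : ∀ v : Int, lowerBound s v 0 s.length = s.countP (fun a => decide (a < v)) :=
    fun v => lowerBound_eq s v hs s.length 0 s.length (by omega) le_rfl (Nat.zero_le _)
      List.countP_le_length
  have hcnt : ∀ v : Int, s.count v = l.count v := fun v => hperm.count_eq v
  have p0 : s.countP (fun a => decide (a < 1)) = s.countP (fun a => decide (a < 0 + 1)) :=
    List.countP_congr (fun a _ => by norm_num)
  have p1 : s.countP (fun a => decide (a < 2)) = s.countP (fun a => decide (a < 1 + 1)) :=
    List.countP_congr (fun a _ => by norm_num)
  have p2 : s.countP (fun a => decide (a < 3)) = s.countP (fun a => decide (a < 2 + 1)) :=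
    List.countP_congr (fun a _ => by norm_num)
  have e0 := p0.trans (countP_lt_succ s 0)
  have e1 := p1.trans (countP_lt_succ s 1)
  have e2 := p2.trans (countP_lt_succ s 2)
  simp only [List.getD_cons_zero, List.getD_cons_succ]
  rw [gc_fold]
  simp only [hlb]
  refine Prod.ext ?_ rfl
  simp only [List.cons.injEq, and_true]
  refine ⟨?_, ?_, ?_⟩
  · rw [e0, hcnt 0]; push_cast; ring
  · rw [e1, hcnt 1]; push_cast; ring
  · rw [e2, hcnt 2]; push_cast; ring
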